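-- pv_equiv track=rewrite | github.com/dxkkxn/univ-tln | licence1/I23MATHINFO/TP1/xd.py | ListerVariables
-- ===== SOURCE A (Python) =====
-- def ListerVariables(expression):
-- 	Lc=[]
-- 	L=sorted(expression)
-- 	i=0
-- 	alphabet="abcdefghijklmnopqrstuvwxyz"
-- 	while i<len(L):
-- 		if L[i] in alphabet and not(L[i]in Lc):
-- 			Lc += L[i]
-- 		i=i+1
-- 	return Lc
-- ===== SOURCE B (Python) =====
-- def ListerVariables(expression):
--     return [c for c in "abcdefghijklmnopqrstuvwxyz" if c in expression]
-- ===== Notes on version B (the rewrite author's own statement) =====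
-- stated objective: idiomatic
-- what changed: Instead of sorting the expression and deduplicating lowercase letters with a membership-checked accumulator, B scans the fixed alphabet once and keeps each letter that occurs in the expression, which yields the distinct letters already in sorted order.
import Mathlib
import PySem

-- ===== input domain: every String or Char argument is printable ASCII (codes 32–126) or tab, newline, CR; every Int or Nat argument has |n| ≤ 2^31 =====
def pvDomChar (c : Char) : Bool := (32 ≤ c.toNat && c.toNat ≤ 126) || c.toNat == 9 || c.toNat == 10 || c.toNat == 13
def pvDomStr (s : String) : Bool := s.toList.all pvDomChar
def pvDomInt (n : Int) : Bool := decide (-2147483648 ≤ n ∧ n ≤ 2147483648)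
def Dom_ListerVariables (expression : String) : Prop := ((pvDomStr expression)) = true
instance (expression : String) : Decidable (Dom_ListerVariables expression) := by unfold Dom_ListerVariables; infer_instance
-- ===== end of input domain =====

-- B replaces A's sort-then-dedup accumulator scan by a single filter of the fixed
-- alphabet against the expression (idiomatic; output is identical).

-- ===== PORT A =====
-- A: sort the characters, then scan left to right keeping lowercase letters not seen yet.
-- `Lc += L[i]` appends the one-character string; `L[i] in alphabet` is membership of the
-- single character in the alphabet string (exact: ported as membership in its char list).
def ListerVariables (expression : String) : List String :=
  (PySem.List.sorted expression.toList (fun c => c) false).foldl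
    (fun Lc c =>
      if ("abcdefghijklmnopqrstuvwxyz".toList.contains c)
          && !(Lc.contains (String.singleton c))
      then Lc ++ [String.singleton c] else Lc) []

-- ===== PORT B =====
-- B: keep each alphabet letter that occurs in the expression (`c in expression` on a
-- one-character c is membership in the expression's characters).
def ListerVariables_alt (expression : String) : List String :=
  ("abcdefghijklmnopqrstuvwxyz".toList.filter
    (fun c => expression.toList.contains c)).map String.singleton

-- ===== PRECONDITION & SPEC =====
def Spec_ListerVariables (expression : String) (out : List String) : Prop := out = ListerVariables_alt expression
instance (expression : String) (out : List String) : Decidable (Spec_ListerVariables expression out) := by unfold Spec_ListerVariables; infer_instance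

-- ===== CLAIM (what is proved, stated in full; the proofs are below) =====
def Claim_equal_ListerVariables : Prop := ∀ (expression : String), Dom_ListerVariables expression → Spec_ListerVariables expression (ListerVariables expression)

-- ===== LEMMAS AND PROOFS =====

-- A's loop step, on characters (the step on strings is its image under String.singleton).
def pvStep (lc : List Char) (c : Char) : List Char :=
  if ("abcdefghijklmnopqrstuvwxyz".toList.contains c) && !(lc.contains c)
  then lc ++ [c] else lc

theorem pv_singleton_inj : Function.Injective String.singleton := by
  intro a b h
  have := congrArg String.toList h
  simpa [String.singleton] using this

theorem pv_map_contains (lc : List Char) (c : Char) :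
    (lc.map String.singleton).contains (String.singleton c) = lc.contains c := by
  simp [pv_singleton_inj.eq_iff]

theorem pv_stepS_eq (lc : List Char) (c : Char) :
    (if ("abcdefghijklmnopqrstuvwxyz".toList.contains c)
        && !((lc.map String.singleton).contains (String.singleton c))
     then (lc.map String.singleton) ++ [String.singleton c] else lc.map String.singleton)
    = (pvStep lc c).map String.singleton := by
  rw [pv_map_contains, pvStep]
  by_cases h : ("abcdefghijklmnopqrstuvwxyz".toList.contains c && !lc.contains c) = true
  · rw [if_pos h, if_pos h, List.map_append]; rfl
  · rw [if_neg h, if_neg h]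

theorem pv_foldl_map (S : List Char) : ∀ lc : List Char,
    S.foldl (fun Lc c =>
      if ("abcdefghijklmnopqrstuvwxyz".toList.contains c)
          && !(Lc.contains (String.singleton c))
      then Lc ++ [String.singleton c] else Lc) (lc.map String.singleton)
    = (S.foldl pvStep lc).map String.singleton := by
  induction S with
  | nil => intro lc; rfl
  | cons a S ih =>
    intro lc
    simp only [List.foldl_cons]
    rw [pv_stepS_eq lc a]
    exact ih (pvStep lc a)

theorem pv_mem_foldl (S : List Char) : ∀ (lc : List Char) (c : Char),
    c ∈ S.foldl pvStep lc ↔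
      c ∈ lc ∨ (c ∈ S ∧ ("abcdefghijklmnopqrstuvwxyz".toList.contains c) = true) := by
  induction S with
  | nil => intro lc c; simp
  | cons y S ih =>
    intro lc c
    simp only [List.foldl_cons, pvStep]
    by_cases h : ("abcdefghijklmnopqrstuvwxyz".toList.contains y && !lc.contains y) = true
    · rw [if_pos h, ih]
      constructor
      · rintro (hm | hm)
        · rcases List.mem_append.mp hm with hm | hm
          · exact Or.inl hm
          · rw [List.mem_singleton] at hm
            subst hm
            have hy : ("abcdefghijklmnopqrstuvwxyz".toList.contains c) = true := by
              cases hb : ("abcdefghijklmnopqrstuvwxyz".toList.contains c)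
              · rw [hb] at h; simp at h
              · rfl
            exact Or.inr ⟨List.mem_cons_self, hy⟩
        · exact Or.inr ⟨List.mem_cons_of_mem _ hm.1, hm.2⟩
      · rintro (hm | ⟨hm, hc⟩)
        · exact Or.inl (List.mem_append_left _ hm)
        · rcases List.mem_cons.mp hm with rfl | hm
          · exact Or.inl (List.mem_append_right _ (List.mem_singleton.mpr rfl))
          · exact Or.inr ⟨hm, hc⟩
    · rw [if_neg h, ih]
      constructor
      · rintro (hm | hm)
        · exact Or.inl hm
        · exact Or.inr ⟨List.mem_cons_of_mem _ hm.1, hm.2⟩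
      · rintro (hm | ⟨hm, hc⟩)
        · exact Or.inl hm
        · rcases List.mem_cons.mp hm with rfl | hm
          · -- c = y: the step did not add it, so it must already be in lc
            cases hb : lc.contains c with
            | true => exact Or.inl (List.contains_iff_mem.mp hb)
            | false => exact absurd (by rw [hc, hb]; rfl) h
          · exact Or.inr ⟨hm, hc⟩

theorem pv_pairwise_foldl (S : List Char) : ∀ lc : List Char,
    S.Pairwise (· ≤ ·) → lc.Pairwise (· < ·) →
    (∀ x ∈ lc, ∀ s ∈ S, x ≤ s) →
    (S.foldl pvStep lc).Pairwise (· < ·) := by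
  induction S with
  | nil => intro lc _ h _; exact h
  | cons y S ih =>
    intro lc hS hlc hle
    have hS' := (List.pairwise_cons.mp hS).2
    have hyS := (List.pairwise_cons.mp hS).1
    simp only [List.foldl_cons, pvStep]
    by_cases h : ("abcdefghijklmnopqrstuvwxyz".toList.contains y && !lc.contains y) = true
    · rw [if_pos h]
      apply ih _ hS'
      · apply List.pairwise_append.mpr
        refine ⟨hlc, List.pairwise_singleton _ _, ?_⟩
        intro x hx z hz
        rw [List.mem_singleton] at hz
        rw [hz]
        have hne : x ≠ y := by
          rintro rfl
          have hb : lc.contains x = true := List.contains_iff_mem.mpr hx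
          rw [hb] at h; simp at h
        exact lt_of_le_of_ne (hle x hx y List.mem_cons_self) hne
      · intro x hx s hs
        rcases List.mem_append.mp hx with hx | hx
        · exact hle x hx s (List.mem_cons_of_mem _ hs)
        · rw [List.mem_singleton] at hx
          rw [hx]
          exact hyS s hs
    · rw [if_neg h]
      exact ih lc hS' hlc (fun x hx s hs => hle x hx s (List.mem_cons_of_mem _ hs))

-- the characters kept by A
def pvCharsA (expression : String) : List Char :=
  (PySem.List.sorted expression.toList (fun c => c) false).foldl pvStep []

-- the characters kept by B
def pvCharsB (expression : String) : List Char :=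
  "abcdefghijklmnopqrstuvwxyz".toList.filter (fun c => expression.toList.contains c)

theorem pv_chars_eq (expression : String) : pvCharsA expression = pvCharsB expression := by
  have hpa : (pvCharsA expression).Pairwise (· < ·) := by
    apply pv_pairwise_foldl _ _ ?_ List.Pairwise.nil (by simp)
    simpa using PySem.List.sorted_pairwise (xs := expression.toList) (key := fun c => c)
  have hpb : (pvCharsB expression).Pairwise (· < ·) := by
    apply List.Pairwise.filter
    decide
  have hmem : ∀ c, c ∈ pvCharsA expression ↔ c ∈ pvCharsB expression := by
    intro c
    rw [pvCharsA, pv_mem_foldl, pvCharsB, List.mem_filter]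
    simp [PySem.List.mem_sorted, and_comm]
  have hperm : (pvCharsA expression).Perm (pvCharsB expression) :=
    (List.perm_ext_iff_of_nodup
      (hpa.imp ne_of_lt) (hpb.imp ne_of_lt)).mpr hmem
  exact hperm.eq_of_pairwise (fun a b _ _ h h' => absurd h' (not_lt.mpr h.le)) hpa hpb

-- ===== VERDICT (by name: the statement is the Claim_ definition above) =====
theorem ListerVariables_spec : Claim_equal_ListerVariables := by
  intro expression _
  show ListerVariables expression = ListerVariables_alt expression
  have h1 : ListerVariables expression = (pvCharsA expression).map String.singleton :=
    pv_foldl_map _ []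
  rw [h1, pv_chars_eq]
  rfl
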